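-- pv_equiv track=rewrite | github.com/blarich22/personal-website | misc-proj/Optimal-Matchup/gen_opt_combo_5_25.py | createTypes
-- ===== SOURCE A (Python) =====
-- def isPresent(elt, arr, mode = "whole"):
--     try:
--         eltIndex = arr.index(elt)
--         if (mode == "whole"):
--             if (len(arr[eltIndex]) == len(elt)): #are they the same word
--                 return True
--     except:
--         return False
--
-- typeArr = ["Water", "Fire", "Grass",
--             "Electric", "Dragon", "Flying",
--             "Fighting", "Bug", "Poison",
--             "Rock", "Steel", "Ice", "Ground",
--             "Ghost", "Dark", "Psychic", "Normal"]
--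
-- def createTypes(mode = "include_nonpairs"):
--
--
--     completeTypeArr = []
--     for i in range(len(typeArr)):
--         for j in range(len(typeArr)):
--             if (typeArr[i] == typeArr[j]): #avoid water/water, i.e
--                 if (mode == "include_nonpairs"):
--                     completeTypeArr.append(typeArr[j])
--                 elif (mode == "include_pairs"):
--                     continue
--             elif False == (isPresent(typeArr[j] + '/' + typeArr[i] , completeTypeArr)):
--                 newType = typeArr[i] + "/" + typeArr[j]
--                 completeTypeArr.append(newType)
--     return completeTypeArr
-- ===== SOURCE B (Python) =====
-- typeArr = ["Water", "Fire", "Grass",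
--             "Electric", "Dragon", "Flying",
--             "Fighting", "Bug", "Poison",
--             "Rock", "Steel", "Ice", "Ground",
--             "Ghost", "Dark", "Psychic", "Normal"]
--
-- def createTypes(mode = "include_nonpairs"):
--     # Iterate only the upper triangle; no membership scan needed,
--     # since only i<j pairs are ever produced.
--     out = []
--     for i in range(len(typeArr)):
--         if mode == "include_nonpairs":
--             out.append(typeArr[i])
--         for j in range(i + 1, len(typeArr)):
--             out.append(typeArr[i] + "/" + typeArr[j])
--     return out
-- ===== Notes on version B (the rewrite author's own statement) =====
-- stated objective: simpler
-- what changed: Replaces the full 17x17 double loop with its reverse-membership list scan (isPresent) by a direct upper-triangle iteration (j from i+1); the isPresent helper and its scan disappear.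
import Mathlib
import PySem

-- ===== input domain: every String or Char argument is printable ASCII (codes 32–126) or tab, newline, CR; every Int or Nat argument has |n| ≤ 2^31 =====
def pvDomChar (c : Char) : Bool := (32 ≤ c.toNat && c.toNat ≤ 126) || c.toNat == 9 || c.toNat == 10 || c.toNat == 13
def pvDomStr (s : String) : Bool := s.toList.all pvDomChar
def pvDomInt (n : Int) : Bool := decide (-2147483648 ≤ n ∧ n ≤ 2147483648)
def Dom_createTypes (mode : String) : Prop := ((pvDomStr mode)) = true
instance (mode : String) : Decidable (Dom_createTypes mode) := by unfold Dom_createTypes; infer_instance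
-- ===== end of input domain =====

-- B iterates only the upper triangle (j from i+1), dropping the isPresent membership scan; same output, same order.


-- ===== PORT A =====
def typeArrP : List String := ["Water", "Fire", "Grass",
            "Electric", "Dragon", "Flying",
            "Fighting", "Bug", "Poison",
            "Rock", "Steel", "Ice", "Ground",
            "Ghost", "Dark", "Psychic", "Normal"]

-- isPresent returns True / False / None in Python; ported as Option Bool (none = Python None)
def isPresentP (elt : String) (arr : List String) (mode : String) : Option Bool :=
  match PySem.List.index? arr elt with
  | none => some false      -- .index raised ValueError → except: return False
  | some i =>
    if mode == "whole" then
      if PySem.Str.len (PySem.List.pyGetD arr i "") == PySem.Str.len elt then some true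
      else none             -- falls off the end → None
    else none

def createTypes (mode : String) : List String :=
  (PySem.List.pyRange 0 ((typeArrP.length : Int)) 1).foldl (fun acc i =>
    (PySem.List.pyRange 0 ((typeArrP.length : Int)) 1).foldl (fun acc j =>
      let ti := PySem.List.pyGetD typeArrP i ""
      let tj := PySem.List.pyGetD typeArrP j ""
      if ti == tj then
        if mode == "include_nonpairs" then acc ++ [tj]
        else if mode == "include_pairs" then acc  -- continue
        else acc
      else if isPresentP (tj ++ "/" ++ ti) acc "whole" == some false then
        acc ++ [ti ++ "/" ++ tj]
      else acc) acc) []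

-- ===== PORT B =====
def createTypes_alt (mode : String) : List String :=
  (PySem.List.pyRange 0 ((typeArrP.length : Int)) 1).foldl (fun acc i =>
    let acc := if mode == "include_nonpairs" then acc ++ [PySem.List.pyGetD typeArrP i ""] else acc
    (PySem.List.pyRange (i + 1) ((typeArrP.length : Int)) 1).foldl (fun acc j =>
      acc ++ [PySem.List.pyGetD typeArrP i "" ++ "/" ++ PySem.List.pyGetD typeArrP j ""]) acc) []

-- ===== PRECONDITION & SPEC =====
def Spec_createTypes (mode : String) (out : List String) : Prop := out = createTypes_alt mode
instance (mode : String) (out : List String) : Decidable (Spec_createTypes mode out) := by unfold Spec_createTypes; infer_instance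

-- ===== CLAIM (what is proved, stated in full; the proofs are below) =====
def Claim_equal_createTypes : Prop := ∀ (mode : String), Dom_createTypes mode → Spec_createTypes mode (createTypes mode)

-- ===== LEMMAS AND PROOFS =====
set_option maxRecDepth 100000 in
set_option maxHeartbeats 2000000 in
theorem createTypes_agree (mode : String) : createTypes mode = createTypes_alt mode := by
  by_cases h : mode = "include_nonpairs"
  · subst h; decide
  · have h1 : (mode == "include_nonpairs") = false := by simp [h]
    simp only [createTypes, createTypes_alt, h1, Bool.false_eq_true, if_false, ite_self]
    decide

-- ===== VERDICT (by name: the statement is the Claim_ definition above) =====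
theorem createTypes_spec : Claim_equal_createTypes := by
  intro mode _
  unfold Spec_createTypes
  exact createTypes_agree mode
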